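-- pv_equiv track=rewrite | github.com/smullins7/advent-of-code | 2021/day_17.py | highest_y
-- ===== SOURCE A (Python) =====
-- def highest_y(y, steps):
--     y_p = 0
--     highest = 0
--     for _ in range(steps):
--         y_p += y
--         y -= 1
--         if y_p > highest:
--             highest = y_p
--         if y <= 0:
--             break
--     return highest
-- ===== SOURCE B (Python) =====
-- def highest_y(y, steps):
--     if steps <= 0 or y <= 0:
--         return 0
--     k = min(steps, y)
--     return k * y - k * (k - 1) // 2
-- ===== Notes on version B (the rewrite author's own statement) =====
-- stated objective: faster
-- what changed: Replaced the step-by-step simulation loop with the closed-form arithmetic-series sum k*y - k*(k-1)/2 with k = min(steps, y), returning 0 when steps or y is nonpositive.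
import Mathlib
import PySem

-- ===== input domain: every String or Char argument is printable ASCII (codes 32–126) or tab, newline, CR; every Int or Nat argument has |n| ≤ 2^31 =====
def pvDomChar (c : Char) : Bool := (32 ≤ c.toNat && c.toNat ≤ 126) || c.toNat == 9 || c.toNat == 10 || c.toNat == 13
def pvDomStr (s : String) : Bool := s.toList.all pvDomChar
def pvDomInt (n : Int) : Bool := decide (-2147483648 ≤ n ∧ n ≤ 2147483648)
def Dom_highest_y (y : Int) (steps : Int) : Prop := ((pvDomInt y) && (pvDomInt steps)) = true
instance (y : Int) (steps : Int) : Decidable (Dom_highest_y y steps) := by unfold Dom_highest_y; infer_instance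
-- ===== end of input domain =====

-- B replaces A's step-by-step simulation loop with the closed-form arithmetic-series
-- sum k*y - k*(k-1)//2, k = min(steps, y): O(1) instead of O(min(steps, y)).


-- ===== PORT A =====
-- the for-loop of A with its early break; fuel = number of remaining range iterations
def highestYLoop : Nat → Int → Int → Int → Int
  | 0, _, _, highest => highest
  | n + 1, y, y_p, highest =>
    let y_p' := y_p + y
    let y' := y - 1
    let highest' := if y_p' > highest then y_p' else highest
    if y' ≤ 0 then highest' else highestYLoop n y' y_p' highest'

def highest_y (y : Int) (steps : Int) : Int :=
  highestYLoop steps.toNat y 0 0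

-- ===== PORT B =====
def highest_y_alt (y : Int) (steps : Int) : Int :=
  if steps ≤ 0 ∨ y ≤ 0 then 0
  else
    let k := min steps y
    k * y - PySem.Int.floordiv (k * (k - 1)) 2

-- ===== PRECONDITION & SPEC =====
def Spec_highest_y (y : Int) (steps : Int) (out : Int) : Prop := out = highest_y_alt y steps
instance (y : Int) (steps : Int) (out : Int) : Decidable (Spec_highest_y y steps out) := by unfold Spec_highest_y; infer_instance

-- ===== CLAIM (what is proved, stated in full; the proofs are below) =====
def Claim_equal_highest_y : Prop := ∀ (y : Int) (steps : Int), Dom_highest_y y steps → Spec_highest_y y steps (highest_y y steps)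

-- ===== LEMMAS AND PROOFS =====

lemma half_step (k : Int) (_hk : 1 ≤ k) :
    ((k + 1) * k) / 2 = k * (k - 1) / 2 + k := by
  obtain ⟨t, ht⟩ : Even (k * (k - 1)) := by
    have := Int.even_mul_succ_self (k - 1)
    simpa [mul_comm] using this
  have h1 : k * (k - 1) = 2 * t := by rw [ht]; ring
  have h2 : (k + 1) * k = 2 * (t + k) := by linear_combination h1
  rw [h1, h2, Int.mul_ediv_cancel_left _ (by norm_num), Int.mul_ediv_cancel_left _ (by norm_num)]

-- invariant of A's loop in the running case: with y ≥ 1 and highest ≤ y_p, the loop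
-- adds the sum of the next min(n+1, y) terms of the decreasing series to y_p
lemma loop_eq (n : Nat) : ∀ (y y_p h : Int), 1 ≤ y → h ≤ y_p →
    highestYLoop (n + 1) y y_p h =
      y_p + (min ((n : Int) + 1) y) * y - ((min ((n : Int) + 1) y) * ((min ((n : Int) + 1) y) - 1)) / 2 := by
  induction n with
  | zero =>
    intro y y_p h hy hh
    have hmin : min ((0 : Int) + 1) y = 1 := by omega
    simp only [highestYLoop]
    have : y_p + y > h := by omega
    split_ifs <;> simp_all
  | succ m ih =>
    intro y y_p h hy hh
    have hpos : y_p + y > h := by omega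
    rw [highestYLoop]
    by_cases h1 : y - 1 ≤ 0
    · have hy1 : y = 1 := by omega
      subst hy1
      simp only [if_pos h1, if_pos hpos]
      have hmin : min ((m : Int) + 1 + 1) (1 : Int) = 1 := by omega
      push_cast
      rw [hmin]
      norm_num
    · have hrec := ih (y - 1) (y_p + y) (y_p + y) (by omega) (le_refl _)
      simp only [if_neg h1, if_pos hpos]
      push_cast
      push_cast at hrec
      rw [hrec]
      set k := min ((m : Int) + 1) (y - 1)
      have hk1 : 1 ≤ k := by omega
      have hmin2 : min ((m : Int) + 1 + 1) y = k + 1 := by omega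
      rw [hmin2]
      have hdiv : (k + 1) * (k + 1 - 1) / 2 = k * (k - 1) / 2 + k := by
        simpa using half_step k hk1
      rw [hdiv]
      ring_nf

-- ===== VERDICT (by name: the statement is the Claim_ definition above) =====
theorem highest_y_spec : Claim_equal_highest_y := by
  intro y steps _
  unfold Spec_highest_y highest_y highest_y_alt
  by_cases hs : steps ≤ 0
  · have : steps.toNat = 0 := by omega
    simp [this, highestYLoop, hs]
  · by_cases hy : y ≤ 0
    · -- one iteration: y_p = y ≤ 0 never beats highest = 0; y-1 ≤ 0 breaks
      obtain ⟨n, hn⟩ : ∃ n, steps.toNat = n + 1 := ⟨steps.toNat - 1, by omega⟩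
      simp [hn, highestYLoop, hy, show y - 1 ≤ 0 by omega, hs]
    · obtain ⟨n, hn⟩ : ∃ n, steps.toNat = n + 1 := ⟨steps.toNat - 1, by omega⟩
      have h := loop_eq n y 0 0 (by omega) (le_refl _)
      rw [hn, h]
      have hns : (n : Int) + 1 = steps := by omega
      rw [hns]
      simp [hs, hy]
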